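-- pv_equiv track=rewrite | github.com/tiltowait/Tzimisce | storyteller/probabilities.py | __successful_combinations
-- ===== SOURCE A (Python) =====
-- import math
-- from collections import namedtuple, defaultdict
--
-- SuccessfulPermutation = namedtuple("SuccessfulPermutation", ["tens", "successes", "ones"])
--
-- def __successful_combinations(pool, target, specialty) -> list:
--     """Returns all possible successful combinations for a given dice pool."""
--     combinations = []
--
--     for suxx in range(0, pool + 1):
--         # Calculate the minimum number of tens required to reach the target
--         min_tens = math.ceil((target - suxx) / 2)
--         if min_tens < 0:
--             min_tens = 0
--         max_tens = pool - suxx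
--
--         for tens in range(min_tens, max_tens + 1):
--             # Calculate the max number of ones allowed
--             t_ss = suxx + tens
--             if specialty:
--                 t_ss += tens # Tens only count for double successes in a specialty
--
--             remaining_dice = pool - (suxx + tens)
--             margin = t_ss - target
--             max_ones = margin if margin <= remaining_dice else remaining_dice
--
--             for ones in range(0, max_ones + 1):
--                 combinations.append(SuccessfulPermutation(tens, suxx, ones))
--
--     return combinations
-- ===== SOURCE B (Python) =====
-- from collections import namedtuple
--
-- SuccessfulPermutation = namedtuple("SuccessfulPermutation", ["tens", "successes", "ones"])
--
-- def __successful_combinations(pool, target, specialty) -> list: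
--     """Brute-force: enumerate all (suxx, tens, ones) triples and keep those
--     that fit in the pool and net enough successes."""
--     combinations = []
--     for suxx in range(pool + 1):
--         for tens in range(pool + 1):
--             t_ss = suxx + 2 * tens if specialty else suxx + tens
--             for ones in range(pool + 1):
--                 if suxx + tens + ones <= pool and t_ss - ones >= target:
--                     combinations.append(SuccessfulPermutation(tens, suxx, ones))
--     return combinations
-- ===== Notes on version B (the rewrite author's own statement) =====
-- stated objective: simpler
-- what changed: B replaces A's analytically derived loop bounds (ceil-based min_tens, min-computed max_ones) with a plain brute-force enumeration of all (suxx, tens, ones) triples over range(pool+1) filtered by the two defining predicates (fits in the pool, nets at least the target), emitting the identical list in identical order.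
import Mathlib
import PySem

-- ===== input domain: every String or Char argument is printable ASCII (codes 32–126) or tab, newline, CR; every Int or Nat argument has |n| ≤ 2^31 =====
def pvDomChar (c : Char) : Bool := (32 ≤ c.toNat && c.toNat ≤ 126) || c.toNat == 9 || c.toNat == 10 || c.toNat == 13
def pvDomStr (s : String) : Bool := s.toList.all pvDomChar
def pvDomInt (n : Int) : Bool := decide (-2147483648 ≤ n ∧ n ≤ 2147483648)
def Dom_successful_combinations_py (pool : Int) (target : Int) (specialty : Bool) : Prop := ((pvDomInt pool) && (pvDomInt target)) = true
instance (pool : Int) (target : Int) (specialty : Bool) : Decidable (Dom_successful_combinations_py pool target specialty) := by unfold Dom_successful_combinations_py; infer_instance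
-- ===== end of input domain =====

-- B replaces A's analytically derived loop bounds with a brute-force triple enumeration
-- over range(pool+1) plus a filter predicate (simpler, not faster); same list, same order.

-- ===== PORT A =====
def successful_combinations_py (pool : Int) (target : Int) (specialty : Bool) : List (Int × Int × Int) :=
  (PySem.List.pyRange 0 (pool + 1) 1).foldl (fun acc suxx =>
    let min_tens0 := -(PySem.Int.floordiv (-(target - suxx)) 2)
    let min_tens := if min_tens0 < 0 then 0 else min_tens0
    let max_tens := pool - suxx
    (PySem.List.pyRange min_tens (max_tens + 1) 1).foldl (fun acc tens =>
      let t_ss0 := suxx + tens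
      let t_ss := if specialty then t_ss0 + tens else t_ss0
      let remaining_dice := pool - (suxx + tens)
      let margin := t_ss - target
      let max_ones := if margin ≤ remaining_dice then margin else remaining_dice
      (PySem.List.pyRange 0 (max_ones + 1) 1).foldl (fun acc ones =>
        acc ++ [(tens, suxx, ones)]) acc) acc) []

-- ===== PORT B =====
def successful_combinations_py_alt (pool : Int) (target : Int) (specialty : Bool) : List (Int × Int × Int) :=
  (PySem.List.pyRange 0 (pool + 1) 1).foldl (fun acc suxx =>
    (PySem.List.pyRange 0 (pool + 1) 1).foldl (fun acc tens =>
      let t_ss := if specialty then suxx + 2 * tens else suxx + tens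
      (PySem.List.pyRange 0 (pool + 1) 1).foldl (fun acc ones =>
        if suxx + tens + ones ≤ pool ∧ t_ss - ones ≥ target then acc ++ [(tens, suxx, ones)] else acc) acc) acc) []


-- ===== PRECONDITION & SPEC =====
def Spec_successful_combinations_py (pool : Int) (target : Int) (specialty : Bool) (out : List (Int × Int × Int)) : Prop := out = successful_combinations_py_alt pool target specialty
instance (pool : Int) (target : Int) (specialty : Bool) (out : List (Int × Int × Int)) : Decidable (Spec_successful_combinations_py pool target specialty out) := by unfold Spec_successful_combinations_py; infer_instance

-- ===== CLAIM (what is proved, stated in full; the proofs are below) =====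
def Claim_equal_successful_combinations_py : Prop := ∀ (pool : Int) (target : Int) (specialty : Bool), Dom_successful_combinations_py pool target specialty → Spec_successful_combinations_py pool target specialty (successful_combinations_py pool target specialty)

-- ===== LEMMAS AND PROOFS =====
theorem pvFlatMapFilter {α β : Type} (l : List α) (p : α → Bool) (G : α → List β)
    (h : ∀ x ∈ l, p x = false → G x = []) : l.flatMap G = (l.filter p).flatMap G := by
  induction l with
  | nil => rfl
  | cons x xs ih =>
    have ih' := ih (fun y hy => h y (List.mem_cons_of_mem _ hy))
    cases hx : p x with
    | false => simp [List.flatMap_cons, hx, h x (List.mem_cons_self) hx, ih']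
    | true => simp [List.flatMap_cons, hx, ih']

theorem pvFilterInterval (a b N : Int) (ha : 0 ≤ a) (hb : b ≤ N) :
    (PySem.List.pyRange 0 (N+1) 1).filter (fun t => decide (a ≤ t ∧ t ≤ b))
      = PySem.List.pyRange a (b+1) 1 := by
  by_cases hab : b < a
  · rw [List.filter_eq_nil_iff.mpr (by intro t ht; rw [PySem.List.mem_pyRange_one] at ht; simp; omega),
        PySem.List.pyRange_one_eq_nil (by omega)]
  · rw [PySem.List.pyRange_one_append 0 a (N+1) ha (by omega),
        PySem.List.pyRange_one_append a (b+1) (N+1) (by omega) (by omega),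
        List.filter_append, List.filter_append]
    rw [List.filter_eq_nil_iff.mpr (by intro t ht; rw [PySem.List.mem_pyRange_one] at ht; simp; omega)]
    rw [List.filter_eq_self.mpr (by intro t ht; rw [PySem.List.mem_pyRange_one] at ht; simp; omega)]
    rw [List.filter_eq_nil_iff.mpr (by intro t ht; rw [PySem.List.mem_pyRange_one] at ht; simp; omega)]
    simp

theorem pvCeilLt (x q : Int) : q < -(PySem.Int.floordiv (-x) 2) ↔ 2*q < x := by
  have h := PySem.Int.le_floordiv_iff_mul_le (a := -x) (b := 2) (q := -q) (by omega)
  omega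

def pvMinTens (target suxx : Int) : Int :=
  if -(PySem.Int.floordiv (-(target - suxx)) 2) < 0 then 0
  else -(PySem.Int.floordiv (-(target - suxx)) 2)

def pvMaxOnes (pool target : Int) (specialty : Bool) (suxx tens : Int) : Int :=
  if (if specialty then suxx + tens + tens else suxx + tens) - target ≤ pool - (suxx + tens)
  then (if specialty then suxx + tens + tens else suxx + tens) - target
  else pool - (suxx + tens)

theorem pvFlattenMapSingleton {α β : Type} (l : List α) (g : α → β) :
    (l.map (fun o => [g o])).flatten = l.map g := by
  rw [← List.flatMap_def]; exact List.map_eq_flatMap.symm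

theorem A_flat (pool target : Int) (specialty : Bool) : successful_combinations_py pool target specialty =
    (PySem.List.pyRange 0 (pool+1) 1).flatMap (fun suxx =>
      (PySem.List.pyRange (pvMinTens target suxx) (pool - suxx + 1) 1).flatMap (fun tens =>
        (PySem.List.pyRange 0 (pvMaxOnes pool target specialty suxx tens + 1) 1).map
          (fun o => (tens, suxx, o)))) := by
  simp [successful_combinations_py, pvMinTens, pvMaxOnes, List.flatMap_def, pvFlattenMapSingleton]

theorem B_flat (pool target : Int) (specialty : Bool) : successful_combinations_py_alt pool target specialty =
    (PySem.List.pyRange 0 (pool+1) 1).flatMap (fun suxx =>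
      (PySem.List.pyRange 0 (pool+1) 1).flatMap (fun tens =>
        ((PySem.List.pyRange 0 (pool+1) 1).filter (fun o =>
          decide (suxx + tens + o ≤ pool ∧ (if specialty then suxx + 2*tens else suxx + tens) - o ≥ target))).map
          (fun o => (tens, suxx, o)))) := by
  simp [successful_combinations_py_alt, PySem.List.foldl_append_ite, List.flatMap_def]

theorem pvMain (pool target : Int) (specialty : Bool) : successful_combinations_py pool target specialty = successful_combinations_py_alt pool target specialty := by
  rw [A_flat, B_flat]
  apply List.flatMap_congr
  intro suxx hs
  rw [PySem.List.mem_pyRange_one] at hs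
  -- rewrite B's inner filter into an interval range
  have hB : ∀ tens ∈ PySem.List.pyRange 0 (pool+1) 1,
      ((PySem.List.pyRange 0 (pool+1) 1).filter (fun o =>
        decide (suxx + tens + o ≤ pool ∧ (if specialty then suxx + 2*tens else suxx + tens) - o ≥ target))).map
        (fun o => (tens, suxx, o))
      = (PySem.List.pyRange 0 (pvMaxOnes pool target specialty suxx tens + 1) 1).map
          (fun o => (tens, suxx, o)) := by
    intro tens ht
    rw [PySem.List.mem_pyRange_one] at ht
    rw [List.filter_congr (q := fun o => decide ((0:Int) ≤ o ∧ o ≤ pvMaxOnes pool target specialty suxx tens))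
        (by intro o ho; rw [PySem.List.mem_pyRange_one] at ho
            simp only [decide_eq_decide]
            cases specialty <;> simp [pvMaxOnes] <;> split_ifs <;> omega)]
    rw [pvFilterInterval 0 (pvMaxOnes pool target specialty suxx tens) pool (le_refl 0)
        (by cases specialty <;> simp [pvMaxOnes] <;> split_ifs <;> omega)]
  rw [List.flatMap_congr hB]
  rw [pvFlatMapFilter (PySem.List.pyRange 0 (pool+1) 1)
      (fun tens => decide (pvMinTens target suxx ≤ tens ∧ tens ≤ pool - suxx))
      _
      (by intro tens ht hp
          rw [PySem.List.mem_pyRange_one] at ht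
          simp only [decide_eq_false_iff_not, not_and, not_le] at hp
          have hmo : pvMaxOnes pool target specialty suxx tens < 0 := by
            by_cases hmt : pvMinTens target suxx ≤ tens
            · have := hp hmt
              cases specialty <;> simp [pvMaxOnes] <;> split_ifs <;> omega
            · push Not at hmt
              unfold pvMinTens at hmt
              have hc : tens < -(PySem.Int.floordiv (-(target - suxx)) 2) := by
                split at hmt <;> omega
              rw [pvCeilLt] at hc
              cases specialty <;> simp [pvMaxOnes] <;> split_ifs <;> omega
          rw [PySem.List.pyRange_one_eq_nil (by omega)]
          simp)]
  rw [pvFilterInterval (pvMinTens target suxx) (pool - suxx) pool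
      (by unfold pvMinTens; split <;> omega) (by omega)]

-- ===== VERDICT (by name: the statement is the Claim_ definition above) =====
theorem successful_combinations_py_spec : Claim_equal_successful_combinations_py := by
  intro pool target specialty _
  unfold Spec_successful_combinations_py
  exact pvMain pool target specialty
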